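-- pv_equiv track=rewrite | github.com/Nm02/algoritmos-.py | ejercicio obligatorio 2_b.py | BuscarCuantoTiempoSeVisitoCadaPagina_NavegoCadaUsuario
-- ===== SOURCE A (Python) =====
-- def BuscarCuantoTiempoSeVisitoCadaPagina_NavegoCadaUsuario(paginas,minutos):
--     PaginasYaTomadas=[]
--     for i in range(0,len(paginas)):
--         A=0
--         for j in range (0,len(PaginasYaTomadas)):
--             if PaginasYaTomadas[j][0]!=paginas[i]:
--               A=A+1
--             else:
--               PaginasYaTomadas[j][1]=PaginasYaTomadas[j][1]+minutos[i]
--         if A==len(PaginasYaTomadas):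
--           PaginasYaTomadas.append([])
--           PaginasYaTomadas[len(PaginasYaTomadas)-1].append(paginas[i])
--           PaginasYaTomadas[len(PaginasYaTomadas)-1].append(minutos[i])
--     return PaginasYaTomadas
-- ===== SOURCE B (Python) =====
-- def BuscarCuantoTiempoSeVisitoCadaPagina_NavegoCadaUsuario(paginas, minutos):
--     # Pass 1: distinct pages in first-occurrence order.
--     distinct = []
--     for p in paginas:
--         if p not in distinct:
--             distinct.append(p)
--     # Pass 2: per distinct page, sum the minutes at its indices.
--     resultado = []
--     for p in distinct:
--         total = 0
--         for i in range(len(paginas)):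
--             if paginas[i] == p:
--                 total = total + minutos[i]
--         resultado.append([p, total])
--     return resultado
-- ===== Notes on version B (the rewrite author's own statement) =====
-- stated objective: alternative
-- what changed: A maintains one mutable accumulator list, scanning and updating it in place for every visit; B does two passes: first collect the distinct pages in first-occurrence order, then for each distinct page sum minutos over all matching indices.
import Mathlib
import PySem

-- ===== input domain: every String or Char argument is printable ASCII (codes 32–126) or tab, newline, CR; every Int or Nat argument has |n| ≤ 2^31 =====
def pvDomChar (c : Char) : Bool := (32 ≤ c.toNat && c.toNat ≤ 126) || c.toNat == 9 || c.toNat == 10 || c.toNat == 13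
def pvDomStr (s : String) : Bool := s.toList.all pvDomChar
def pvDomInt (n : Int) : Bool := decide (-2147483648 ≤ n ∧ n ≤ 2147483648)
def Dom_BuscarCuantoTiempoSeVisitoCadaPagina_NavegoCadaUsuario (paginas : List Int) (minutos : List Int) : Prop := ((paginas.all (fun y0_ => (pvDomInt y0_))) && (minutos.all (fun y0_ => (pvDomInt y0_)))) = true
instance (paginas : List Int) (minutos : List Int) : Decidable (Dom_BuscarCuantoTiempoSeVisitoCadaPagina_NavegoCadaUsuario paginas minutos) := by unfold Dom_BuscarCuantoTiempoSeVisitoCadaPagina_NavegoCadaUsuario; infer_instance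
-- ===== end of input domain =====

-- B replaces A's single mutable accumulator (scan-and-update per visit) by two passes:
-- collect distinct pages in first-occurrence order, then sum minutes per page (objective: alternative).

-- ===== PORT A =====
-- inner `for j` loop of A: returns the counter A and the (possibly updated) accumulator
def pvInnerA (p m : Int) : List (List Int) → Nat × List (List Int)
  | [] => (0, [])
  | row :: rest =>
    let (a, rest') := pvInnerA p m rest
    if row.getD 0 0 ≠ p then (a + 1, row :: rest')
    else (a, row.set 1 (row.getD 1 0 + m) :: rest')

-- body of A's outer `for i` loop
def pvStepA (p m : Int) (st : List (List Int)) : List (List Int) :=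
  let r := pvInnerA p m st
  if r.1 = r.2.length then r.2 ++ [[p, m]] else r.2

def BuscarCuantoTiempoSeVisitoCadaPagina_NavegoCadaUsuario (paginas : List Int) (minutos : List Int) : List (List Int) :=
  (List.range paginas.length).foldl
    (fun st i => pvStepA (paginas.getD i 0) (minutos.getD i 0) st) []

-- ===== PORT B =====
def BuscarCuantoTiempoSeVisitoCadaPagina_NavegoCadaUsuario_alt (paginas : List Int) (minutos : List Int) : List (List Int) :=
  let distinct := paginas.foldl (fun d p => if p ∈ d then d else d ++ [p]) []
  distinct.map (fun p =>
    [p, (List.range paginas.length).foldl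
          (fun t i => if paginas.getD i 0 = p then t + minutos.getD i 0 else t) 0])

-- ===== PRECONDITION & SPEC =====
-- Pre_ excludes exactly the inputs where the Python A raises IndexError:
-- minutos[i] is read for every i < len(paginas), so A raises iff len(minutos) < len(paginas).
def Pre_BuscarCuantoTiempoSeVisitoCadaPagina_NavegoCadaUsuario (paginas : List Int) (minutos : List Int) : Prop :=
  paginas.length ≤ minutos.length
instance (paginas : List Int) (minutos : List Int) : Decidable (Pre_BuscarCuantoTiempoSeVisitoCadaPagina_NavegoCadaUsuario paginas minutos) := by unfold Pre_BuscarCuantoTiempoSeVisitoCadaPagina_NavegoCadaUsuario; infer_instance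

def pvWitness_BuscarCuantoTiempoSeVisitoCadaPagina_NavegoCadaUsuario : List Int × List Int := ([1, 2, 1, 3, 2], [5, 6, 7, 8, 9])

def Spec_BuscarCuantoTiempoSeVisitoCadaPagina_NavegoCadaUsuario (paginas : List Int) (minutos : List Int) (out : List (List Int)) : Prop := out = BuscarCuantoTiempoSeVisitoCadaPagina_NavegoCadaUsuario_alt paginas minutos
instance (paginas : List Int) (minutos : List Int) (out : List (List Int)) : Decidable (Spec_BuscarCuantoTiempoSeVisitoCadaPagina_NavegoCadaUsuario paginas minutos out) := by unfold Spec_BuscarCuantoTiempoSeVisitoCadaPagina_NavegoCadaUsuario; infer_instance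

-- ===== CLAIM (what is proved, stated in full; the proofs are below) =====
def Claim_equal_BuscarCuantoTiempoSeVisitoCadaPagina_NavegoCadaUsuario : Prop := ∀ (paginas : List Int) (minutos : List Int), Dom_BuscarCuantoTiempoSeVisitoCadaPagina_NavegoCadaUsuario paginas minutos → Pre_BuscarCuantoTiempoSeVisitoCadaPagina_NavegoCadaUsuario paginas minutos → Spec_BuscarCuantoTiempoSeVisitoCadaPagina_NavegoCadaUsuario paginas minutos (BuscarCuantoTiempoSeVisitoCadaPagina_NavegoCadaUsuario paginas minutos)

-- ===== LEMMAS AND PROOFS =====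

-- abstract view of A's accumulator: a list of (page, total) pairs
def pairRow (x : Int × Int) : List Int := [x.1, x.2]

def absStep (l : List (Int × Int)) (x : Int × Int) : List (Int × Int) :=
  if x.1 ∈ l.map Prod.fst then l.map (fun y => if y.1 = x.1 then (y.1, y.2 + x.2) else y)
  else l ++ [x]

def distStep (d : List Int) (p : Int) : List Int := if p ∈ d then d else d ++ [p]

-- an index fold over range(len pa) reading pa[i], mi[i] is a fold over pa.zip mi
lemma foldl_idx {σ : Type} (g : σ → Int → Int → σ) :
    ∀ (pa mi : List Int) (init : σ), pa.length ≤ mi.length →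
    (List.range pa.length).foldl (fun s i => g s (pa.getD i 0) (mi.getD i 0)) init
      = (pa.zip mi).foldl (fun s x => g s x.1 x.2) init := by
  intro pa
  induction pa with
  | nil => intro mi init _; simp
  | cons p pa ih =>
    intro mi init h
    cases mi with
    | nil => simp at h
    | cons m mi =>
      simp only [List.length_cons, List.range_succ_eq_map, List.foldl_cons, List.foldl_map,
        List.getD_cons_zero, List.getD_cons_succ, List.zip_cons_cons]
      exact ih mi (g init p m) (by simpa using h)

lemma innerA_spec (p m : Int) (l : List (Int × Int)) :
    pvInnerA p m (l.map pairRow) =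
      ((l.filter (fun y => y.1 ≠ p)).length,
       (l.map (fun y => if y.1 = p then (y.1, y.2 + m) else y)).map pairRow) := by
  induction l with
  | nil => simp [pvInnerA]
  | cons y l ih =>
    by_cases hy : y.1 = p <;>
      simp [pvInnerA, pairRow, ih, hy, List.set]

lemma filter_ne_length_iff (p : Int) (l : List (Int × Int)) :
    (l.filter (fun y => y.1 ≠ p)).length = l.length ↔ p ∉ l.map Prod.fst := by
  rw [List.length_filter_eq_length_iff]
  constructor
  · intro h hp
    obtain ⟨y, hyl, hy1⟩ := List.mem_map.mp hp
    have hb := h y hyl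
    simp only [ne_eq, decide_eq_true_eq] at hb
    exact hb hy1
  · intro h y hyl
    simp only [ne_eq, decide_eq_true_eq]
    exact fun he => h (he ▸ List.mem_map_of_mem hyl)

lemma stepA_abs (p m : Int) (l : List (Int × Int)) :
    pvStepA p m (l.map pairRow) = (absStep l (p, m)).map pairRow := by
  unfold pvStepA absStep
  rw [innerA_spec]
  simp only [List.length_map]
  by_cases hmem : p ∈ l.map Prod.fst
  · rw [if_neg (fun h => (filter_ne_length_iff p l).mp h hmem), if_pos hmem]
  · rw [if_pos ((filter_ne_length_iff p l).mpr hmem), if_neg hmem]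
    have hid : l.map (fun y => if y.1 = p then (y.1, y.2 + m) else y) = l := by
      rw [List.map_congr_left (g := id), List.map_id]
      intro y hyl
      have : y.1 ≠ p := fun h => hmem (h ▸ List.mem_map_of_mem hyl)
      simp [this]
    rw [hid, List.map_append]
    rfl

lemma loopA_abs : ∀ (zs : List (Int × Int)) (l : List (Int × Int)),
    zs.foldl (fun st x => pvStepA x.1 x.2 st) (l.map pairRow)
      = (zs.foldl absStep l).map pairRow := by
  intro zs
  induction zs with
  | nil => intro l; rfl
  | cons x zs ih =>
    intro l
    simp only [List.foldl_cons, stepA_abs]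
    exact ih (absStep l x)

lemma mem_foldl_distStep (q : Int) : ∀ (xs : List Int) (d : List Int),
    q ∈ xs.foldl distStep d ↔ q ∈ d ∨ q ∈ xs := by
  intro xs
  induction xs with
  | nil => simp
  | cons x xs ih =>
    intro d
    simp only [List.foldl_cons, ih, distStep]
    by_cases hx : x ∈ d <;> by_cases hq : q = x <;> simp [hx, hq]

 
lemma sum_notmem (q : Int) : ∀ (zs : List (Int × Int)) (t : Int),
    q ∉ zs.map Prod.fst →
    zs.foldl (fun t x => if x.1 = q then t + x.2 else t) t = t := by
  intro zs
  induction zs with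
  | nil => intros; rfl
  | cons x zs ih =>
    intro t h
    simp only [List.map_cons, List.mem_cons, not_or] at h
    simp only [List.foldl_cons]
    rw [if_neg (fun he => h.1 he.symm)]
    exact ih t h.2

lemma abs_spec : ∀ (zs : List (Int × Int)),
    zs.foldl absStep []
      = ((zs.map Prod.fst).foldl distStep []).map
          (fun q => (q, zs.foldl (fun t x => if x.1 = q then t + x.2 else t) 0)) := by
  intro zs
  induction zs using List.reverseRecOn with
  | nil => rfl
  | append_singleton zs x ih =>
    simp only [List.foldl_append, List.foldl_cons, List.foldl_nil, List.map_append,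
      List.map_cons, List.map_nil, ih]
    set D := (zs.map Prod.fst).foldl distStep [] with hD
    set S := fun q => zs.foldl (fun t x => if x.1 = q then t + x.2 else t) 0 with hS
    have hfst : ∀ (E : List Int), (E.map fun q => (q, S q)).map Prod.fst = E := by
      intro E; induction E with
      | nil => rfl
      | cons e E ihE => simp only [List.map_cons, ihE]
    unfold absStep distStep
    by_cases hmem : x.1 ∈ D
    · rw [if_pos (by rw [hfst]; exact hmem), if_pos hmem]
      rw [List.map_map]
      apply List.map_congr_left
      intro q _
      by_cases hq : q = x.1
      · simp [Function.comp, hq, eq_comm]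
      · have hq' : ¬ x.1 = q := fun h => hq h.symm
        simp [Function.comp, hq, hq']
    · rw [if_neg (by rw [hfst]; exact hmem), if_neg hmem]
      rw [List.map_append]
      congr 1
      · apply List.map_congr_left
        intro q hqD
        have hne : ¬ x.1 = q := fun h => hmem (h ▸ hqD)
        simp [hne]
      · have hx0 : S x.1 = 0 := by
          apply sum_notmem
          intro hin
          exact hmem ((mem_foldl_distStep x.1 (zs.map Prod.fst) []).mpr (Or.inr hin))
        simp only [hS] at hx0
        simp only [List.map_cons, List.map_nil]
        rw [hx0]
        cases x
        simp

-- ===== VERDICT (by name: the statement is the Claim_ definition above) =====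
theorem BuscarCuantoTiempoSeVisitoCadaPagina_NavegoCadaUsuario_spec : Claim_equal_BuscarCuantoTiempoSeVisitoCadaPagina_NavegoCadaUsuario := by
  intro paginas minutos _ hpre
  unfold Spec_BuscarCuantoTiempoSeVisitoCadaPagina_NavegoCadaUsuario
  unfold BuscarCuantoTiempoSeVisitoCadaPagina_NavegoCadaUsuario
  unfold BuscarCuantoTiempoSeVisitoCadaPagina_NavegoCadaUsuario_alt
  have hlen : paginas.length ≤ minutos.length := hpre
  have hfst : (paginas.zip minutos).map Prod.fst = paginas :=
    List.map_fst_zip hlen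
  rw [foldl_idx (fun st p m => pvStepA p m st) paginas minutos [] hpre]
  have h0 : ([] : List (List Int)) = ([] : List (Int × Int)).map pairRow := rfl
  rw [h0, loopA_abs, abs_spec, hfst]
  have hdist : paginas.foldl (fun d p => if p ∈ d then d else d ++ [p]) []
      = paginas.foldl distStep [] := rfl
  rw [hdist, List.map_map]
  apply List.map_congr_left
  intro q _
  rw [foldl_idx (fun t p m => if p = q then t + m else t) paginas minutos 0 hpre]
  simp [Function.comp, pairRow]
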